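-- pv_equiv track=rewrite | github.com/juancarlosbarros/AdventOfCode2015 | Day11.py | transform
-- ===== SOURCE A (Python) =====
-- def transform(word):
--     length = len(word)
--     for pos in range(length-1, -1, -1):
--         char = word[pos]
--         if char == 122:
--             word[pos] = 97
--             continue
--         elif char in [104, 107, 110]:
--             char += 1
--             word[pos] = char
--         char += 1
--         word[pos] = char
--         return word
-- ===== SOURCE B (Python) =====
-- def transform(word):
--     # Find the rightmost position that is not 'z' (122) in one forward scan,
--     # then reset everything to its right to 'a' (97) and bump the pivot
--     # (skipping i/l/o by adding 2 after h/k/n). Mutates word in place like A.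
--     pivot = None
--     for i, c in enumerate(word):
--         if c != 122:
--             pivot = i
--     if pivot is None:
--         for i in range(len(word)):
--             word[i] = 97
--         return None
--     for i in range(pivot + 1, len(word)):
--         word[i] = 97
--     word[pivot] += 2 if word[pivot] in (104, 107, 110) else 1
--     return word
-- ===== Notes on version B (the rewrite author's own statement) =====
-- stated objective: alternative
-- what changed: B replaces A's single right-to-left carry loop with early return by a forward scan that finds the rightmost non-z pivot, a tail-reset pass, and one arithmetic bump of the pivot.
-- outside the precondition, e.g. on transform([122]): A returns None, B returns None; on transform([]): A returns None, B returns None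
import Mathlib
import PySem

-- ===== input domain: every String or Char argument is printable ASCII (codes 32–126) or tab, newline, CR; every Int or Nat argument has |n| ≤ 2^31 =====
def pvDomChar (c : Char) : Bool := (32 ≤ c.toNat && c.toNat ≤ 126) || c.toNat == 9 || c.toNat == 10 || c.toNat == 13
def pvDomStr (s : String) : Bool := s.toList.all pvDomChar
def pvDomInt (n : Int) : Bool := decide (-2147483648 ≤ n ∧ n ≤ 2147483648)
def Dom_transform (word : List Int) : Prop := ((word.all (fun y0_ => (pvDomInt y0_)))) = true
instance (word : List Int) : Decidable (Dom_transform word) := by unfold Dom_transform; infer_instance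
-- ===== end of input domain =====

-- B replaces A's right-to-left carry loop by pivot-find + tail-reset + one bump (alternative
-- decomposition, same cost). Both Pythons mutate `word` in place identically; the equivalence
-- proved here is about the return value.

-- ===== PORT A =====
-- A's backward loop 'for pos in range(length-1, -1, -1)': at step k+1 the current index is k.
-- On fall-through (all elements 122) Python returns None, which is outside Pre_transform;
-- the port returns the mutated list there.
def transformGoA (word : List Int) : Nat → List Int
  | 0 => word
  | k+1 =>
    let char := word.getD k 0      -- word[pos]; pos is always in range inside the loop
    if char = 122 then
      transformGoA (word.set k 97) k
    else if char = 104 ∨ char = 107 ∨ char = 110 then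
      -- char += 1; word[pos] = char; then the shared char += 1; word[pos] = char; return word
      (word.set k (char + 1)).set k (char + 1 + 1)
    else
      (word.set k (char + 1))

def transform (word : List Int) : List Int := transformGoA word word.length

-- ===== PORT B =====
def transform_alt (word : List Int) : List Int :=
  -- pivot = None; for i, c in enumerate(word): if c != 122: pivot = i
  let pivot := (PySem.List.enumerate word 0).foldl
      (fun (acc : Option Int) ic => if ic.2 ≠ 122 then some ic.1 else acc) none
  match pivot with
  | none =>
      -- for i in range(len(word)): word[i] = 97; return None  (outside Pre_transform; the
      -- port returns the mutated list there)
      (List.range word.length).foldl (fun w i => w.set i 97) word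
  | some p =>
      -- for i in range(pivot+1, len(word)): word[i] = 97   (pivot ≥ 0, so plain Nat indices)
      let w := (List.range' (p.toNat + 1) (word.length - (p.toNat + 1))).foldl
          (fun w i => w.set i 97) word
      let c := w.getD p.toNat 0
      w.set p.toNat (c + (if c = 104 ∨ c = 107 ∨ c = 110 then 2 else 1))

-- ===== PRECONDITION & SPEC =====
-- Pre_ excludes the inputs (empty or all-'z' lists) on which A falls through its loop and
-- returns None, which is not a List Int value.
def Pre_transform (word : List Int) : Prop := (word.any (fun c => c != 122)) = true
instance (word : List Int) : Decidable (Pre_transform word) := by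
  unfold Pre_transform; infer_instance

def pvWitness_transform : List Int := [97, 122]

def Spec_transform (word : List Int) (out : List Int) : Prop := out = transform_alt word
instance (word : List Int) (out : List Int) : Decidable (Spec_transform word out) := by
  unfold Spec_transform; infer_instance

-- ===== CLAIM (what is proved, stated in full; the proofs are below) =====
def Claim_equal_transform : Prop :=
  ∀ (word : List Int), Dom_transform word → Pre_transform word →
    Spec_transform word (transform word)

-- ===== LEMMAS AND PROOFS =====

-- rightmost index i < k with word[i] ≠ 122, scanning downward like A does
def pivotA (word : List Int) : Nat → Option Nat
  | 0 => none
  | k+1 => if word.getD k 0 ≠ 122 then some k else pivotA word k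

-- rightmost index with value ≠ 122, by structural recursion (B's forward scan keeps the last)
def rpivot : List Int → Option Nat
  | [] => none
  | x :: xs =>
    match rpivot xs with
    | some k => some (k + 1)
    | none => if x ≠ 122 then some 0 else none

def bump (c : Int) : Int := c + (if c = 104 ∨ c = 107 ∨ c = 110 then 2 else 1)

-- set indices a..b-1 to 97
def setR (w : List Int) (a b : Nat) : List Int :=
  (List.range' a (b - a)).foldl (fun w i => w.set i 97) w

lemma getD_set_ne (w : List Int) (i j : Nat) (c : Int) (h : i ≠ j) :
    (w.set i c).getD j 0 = w.getD j 0 := by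
  simp [List.getD_eq_getElem?_getD, List.getElem?_set_ne h]

lemma pivotA_lt (w : List Int) : ∀ k p, pivotA w k = some p → p < k := by
  intro k
  induction k with
  | zero => intro p h; simp [pivotA] at h
  | succ k ih =>
    intro p h
    simp only [pivotA] at h
    by_cases hz : w.getD k 0 = 122
    · rw [if_neg (not_not_intro hz)] at h
      exact Nat.lt_succ_of_lt (ih p h)
    · rw [if_pos hz] at h
      cases h
      omega

lemma pivotA_congr (w w' : List Int) : ∀ k, (∀ i, i < k → w.getD i 0 = w'.getD i 0) →
    pivotA w k = pivotA w' k := by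
  intro k
  induction k with
  | zero => intro _; rfl
  | succ k ih =>
    intro h
    have hk := h k (Nat.lt_succ_self k)
    simp only [pivotA, hk]
    rw [ih (fun i hi => h i (Nat.lt_succ_of_lt hi))]

lemma pivotA_none (w : List Int) : ∀ k, pivotA w k = none → ∀ i, i < k → w.getD i 0 = 122 := by
  intro k
  induction k with
  | zero => intro _ i hi; omega
  | succ k ih =>
    intro h i hi
    simp only [pivotA] at h
    by_cases hz : w.getD k 0 = 122
    · rw [if_neg (not_not_intro hz)] at h
      rcases Nat.lt_succ_iff_lt_or_eq.mp hi with hlt | heq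
      · exact ih h i hlt
      · rw [heq]; exact hz
    · rw [if_pos hz] at h
      exact absurd h (Option.some_ne_none k)

lemma pivotA_cons (x : Int) (xs : List Int) : ∀ k,
    pivotA (x :: xs) (k + 1) =
      (match pivotA xs k with
       | some p => some (p + 1)
       | none => if x ≠ 122 then some 0 else none) := by
  intro k
  induction k with
  | zero =>
    simp [pivotA]
  | succ k ih =>
    have e1 : pivotA (x :: xs) (k + 1 + 1)
        = if (x :: xs).getD (k + 1) 0 ≠ 122 then some (k + 1) else pivotA (x :: xs) (k + 1) := rfl
    have e2 : pivotA xs (k + 1) = if xs.getD k 0 ≠ 122 then some k else pivotA xs k := rfl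
    rw [e1, List.getD_cons_succ, ih, e2]
    by_cases hz : xs.getD k 0 = 122
    · rw [if_neg (not_not_intro hz), if_neg (not_not_intro hz)]
    · rw [if_pos hz, if_pos hz]

lemma rpivot_eq (xs : List Int) : rpivot xs = pivotA xs xs.length := by
  induction xs with
  | nil => rfl
  | cons x xs ih =>
    have : (x :: xs).length = xs.length + 1 := rfl
    rw [this, pivotA_cons, ← ih]
    rfl

lemma enumFold (xs : List Int) : ∀ (s : Int) (acc : Option Int),
    (PySem.List.enumerate xs s).foldl
        (fun (acc : Option Int) ic => if ic.2 ≠ 122 then some ic.1 else acc) acc =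
      (match rpivot xs with
       | some k => some (s + (k : Int))
       | none => acc) := by
  induction xs with
  | nil => intro s acc; simp [PySem.List.enumerate_nil, rpivot]
  | cons x xs ih =>
    intro s acc
    rw [PySem.List.enumerate_cons, List.foldl_cons, ih]
    by_cases hx : x = 122
    · cases hr : rpivot xs with
      | none => simp [rpivot, hr, hx]
      | some k =>
        simp only [rpivot, hr]
        congr 1
        push_cast
        ring
    · cases hr : rpivot xs with
      | none => simp [rpivot, hr, hx]
      | some k =>
        simp only [rpivot, hr]
        congr 1
        push_cast
        ring

lemma foldl_set_comm : ∀ (l : List Nat) (w : List Int) (i : Nat) (c : Int), i ∉ l →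
    l.foldl (fun w j => w.set j 97) (w.set i c) =
      (l.foldl (fun w j => w.set j 97) w).set i c := by
  intro l
  induction l with
  | nil => intro w i c _; rfl
  | cons j l ih =>
    intro w i c h
    have hij : i ≠ j := fun he => h (he ▸ List.mem_cons_self ..)
    have hl : i ∉ l := fun hm => h (List.mem_cons_of_mem _ hm)
    simp only [List.foldl_cons]
    rw [List.set_comm _ _ hij, ih _ _ _ hl]

lemma getD_foldl_set : ∀ (l : List Nat) (w : List Int) (p : Nat), p ∉ l →
    (l.foldl (fun w j => w.set j 97) w).getD p 0 = w.getD p 0 := by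
  intro l
  induction l with
  | nil => intro w p _; rfl
  | cons j l ih =>
    intro w p h
    have hj : j ≠ p := fun he => h (he ▸ List.mem_cons_self ..)
    have hl : p ∉ l := fun hm => h (List.mem_cons_of_mem _ hm)
    simp only [List.foldl_cons]
    rw [ih _ _ hl, getD_set_ne _ _ _ _ hj]

lemma setR_succ (w : List Int) (p k : Nat) (h : p < k) :
    setR w (p + 1) (k + 1) = (setR w (p + 1) k).set k 97 := by
  unfold setR
  have h1 : k + 1 - (p + 1) = (k - (p + 1)) + 1 := by omega
  rw [h1, List.range'_concat]
  have h2 : p + 1 + 1 * (k - (p + 1)) = k := by omega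
  rw [h2, List.foldl_append]
  rfl

lemma goA_eq (w : List Int) (k p : Nat) (h : pivotA w k = some p) :
    transformGoA w k = (setR w (p + 1) k).set p (bump (w.getD p 0)) := by
  induction k generalizing w with
  | zero => simp [pivotA] at h
  | succ k ih =>
    by_cases hz : w.getD k 0 = 122
    · have h' : pivotA w k = some p := by
        simp only [pivotA] at h
        rwa [if_neg (not_not_intro hz)] at h
      have hpk : p < k := pivotA_lt w k p h'
      have hcongr : pivotA (w.set k 97) k = some p := by
        rw [pivotA_congr (w.set k 97) w k
          (fun i hi => getD_set_ne w k i 97 (by omega))]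
        exact h'
      have hstep : transformGoA w (k + 1) = transformGoA (w.set k 97) k := by
        simp only [transformGoA]
        rw [if_pos hz]
      rw [hstep, ih _ hcongr]
      have hnot : k ∉ List.range' (p + 1) (k - (p + 1)) := by
        intro hm
        have := List.mem_range'_1.mp hm
        omega
      have hset : setR (w.set k 97) (p + 1) k = (setR w (p + 1) k).set k 97 := by
        unfold setR
        exact foldl_set_comm _ w k 97 hnot
      rw [hset, setR_succ w p (k := k) hpk]
      rw [getD_set_ne w k p 97 (by omega)]
    · have hp : p = k := by
        simp only [pivotA] at h
        rw [if_pos hz] at h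
        exact (Option.some.inj h).symm
      subst hp
      have hR : setR w (p + 1) (p + 1) = w := by
        unfold setR
        simp
      rw [hR]
      simp only [transformGoA]
      rw [if_neg hz]
      by_cases hc : w.getD p 0 = 104 ∨ w.getD p 0 = 107 ∨ w.getD p 0 = 110
      · rw [if_pos hc, List.set_set]
        unfold bump
        rw [if_pos hc]
        congr 1
        ring
      · rw [if_neg hc]
        unfold bump
        rw [if_neg hc]

lemma pre_pivot (word : List Int) (h : Pre_transform word) :
    ∃ p, pivotA word word.length = some p := by
  cases hp : pivotA word word.length with
  | some p => exact ⟨p, rfl⟩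
  | none =>
    exfalso
    obtain ⟨c, hmem, hb⟩ := List.any_eq_true.mp h
    have hne : c ≠ 122 := by simpa using hb
    obtain ⟨i, hi, hgi⟩ := List.mem_iff_getElem.mp hmem
    have : word.getD i 0 = c := by
      rw [List.getD_eq_getElem?_getD, List.getElem?_eq_getElem hi]
      simpa using hgi
    have h122 := pivotA_none word word.length hp i hi
    rw [this] at h122
    exact hne h122

-- ===== VERDICT (by name: the statement is the Claim_ definition above) =====
theorem transform_spec : Claim_equal_transform := by
  intro word _ hpre
  unfold Spec_transform
  obtain ⟨p, hp⟩ := pre_pivot word hpre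
  have hA : transform word = (setR word (p + 1) word.length).set p (bump (word.getD p 0)) :=
    goA_eq word word.length p hp
  have hnot : p ∉ List.range' (p + 1) (word.length - (p + 1)) := by
    intro hm
    have := List.mem_range'_1.mp hm
    omega
  have hB : transform_alt word = (setR word (p + 1) word.length).set p (bump (word.getD p 0)) := by
    unfold transform_alt
    rw [enumFold word 0 none, rpivot_eq, hp]
    have htn : ((0 : Int) + (p : Int)).toNat = p := by omega
    simp only [htn]
    unfold setR
    rw [getD_foldl_set _ word p hnot]
    rfl
  rw [hA, hB]
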